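-- pv_equiv track=rewrite | github.com/lucasmedeiros/atal-contests | lista-2/questao1.py | blank_space_counter
-- ===== SOURCE A (Python) =====
-- def blank_space_counter(s, m):
-- 	idx = -1
-- 	l = len(s)
-- 	i = 0
-- 	while i <= (l - m) and idx == -1:
-- 		j = 0
-- 		while j < m and s[i + j] == " ":
-- 			j += 1
-- 		if j == m:
-- 			idx = i
-- 		i += max(1, j)
-- 	return idx
-- ===== SOURCE B (Python) =====
-- def blank_space_counter(s, m):
--     if m == 0:
--         return 0
--     count = 0
--     for i, c in enumerate(s):
--         if c == " ":
--             count += 1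
--             if count == m:
--                 return i - m + 1
--         else:
--             count = 0
--     return -1
-- ===== Notes on version B (the rewrite author's own statement) =====
-- stated objective: simpler
-- what changed: Replaces A's nested inner scan with skip-ahead index arithmetic by a single forward pass maintaining a counter of consecutive spaces (m == 0 special-cased to 0 up front).
import Mathlib
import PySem

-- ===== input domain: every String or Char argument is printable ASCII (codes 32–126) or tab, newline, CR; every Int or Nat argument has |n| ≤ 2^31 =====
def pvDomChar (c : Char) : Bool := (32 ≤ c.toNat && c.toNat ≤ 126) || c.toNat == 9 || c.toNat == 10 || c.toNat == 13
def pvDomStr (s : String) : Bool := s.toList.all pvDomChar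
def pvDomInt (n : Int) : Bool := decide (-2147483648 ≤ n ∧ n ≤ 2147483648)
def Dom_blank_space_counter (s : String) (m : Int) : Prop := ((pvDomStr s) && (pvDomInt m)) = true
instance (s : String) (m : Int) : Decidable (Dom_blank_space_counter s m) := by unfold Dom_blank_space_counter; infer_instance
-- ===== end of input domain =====

-- B replaces A's nested inner scan with skip-ahead index arithmetic by a single
-- forward pass with a consecutive-space counter; objective: simpler.

-- ===== PORT A =====
-- inner 'while j < m and s[i+j] == " "' loop; pyGet? = none (IndexError) cannot
-- occur on A's index values (0 ≤ i+j < len whenever the loop reads s[i+j])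
def pvInnerA (cs : List Char) (i m j : Int) : Int :=
  if h : j < m ∧ PySem.List.pyGet? cs (i + j) = some ' ' then
    pvInnerA cs i m (j + 1)
  else j
termination_by (m - j).toNat
decreasing_by omega

-- outer 'while i <= (l - m) and idx == -1' loop (the local j is inlined)
def pvOuterA (cs : List Char) (l m i idx : Int) : Int :=
  if _h : i ≤ l - m ∧ idx = -1 then
    pvOuterA cs l m (i + max 1 (pvInnerA cs i m 0))
      (if pvInnerA cs i m 0 = m then i else idx)
  else idx
termination_by (l - m + 1 - i).toNat
decreasing_by
  have := le_max_left 1 (pvInnerA cs i m 0)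
  omega

def blank_space_counter (s : String) (m : Int) : Int :=
  pvOuterA s.toList (s.toList.length : Int) m 0 (-1)

-- ===== PORT B =====
-- single pass over the characters: count of consecutive spaces, reset on non-space
def pvLoopB (m : Int) : List Char → Int → Int → Int
  | [], _, _ => -1
  | c :: cs, i, count =>
    if c = ' ' then
      if count + 1 = m then i - m + 1
      else pvLoopB m cs (i + 1) (count + 1)
    else pvLoopB m cs (i + 1) 0

def blank_space_counter_alt (s : String) (m : Int) : Int :=
  if m = 0 then 0 else pvLoopB m s.toList 0 0

-- ===== PRECONDITION & SPEC =====
def Spec_blank_space_counter (s : String) (m : Int) (out : Int) : Prop := out = blank_space_counter_alt s m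
instance (s : String) (m : Int) (out : Int) : Decidable (Spec_blank_space_counter s m out) := by unfold Spec_blank_space_counter; infer_instance

-- ===== CLAIM (what is proved, stated in full; the proofs are below) =====
def Claim_equal_blank_space_counter : Prop := ∀ (s : String) (m : Int), Dom_blank_space_counter s m → Spec_blank_space_counter s m (blank_space_counter s m)

-- ===== LEMMAS AND PROOFS =====

-- reference value: smallest i with an all-space window of length M starting at i, else -1
def pvOk (M : Nat) (full : List Char) (i : Nat) : Bool :=
  decide (i + M ≤ full.length) && ((full.drop i).take M).all (· == ' ')

def pvR (M : Nat) (full : List Char) (i : Nat) : Int :=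
  if _h : i + M ≤ full.length then
    if pvOk M full i then (i : Int) else pvR M full (i + 1)
  else -1
termination_by full.length + 1 - i
decreasing_by omega

lemma pvOk_of (M : Nat) (full : List Char) (i : Nat) (hle : i + M ≤ full.length)
    (hsp : ∀ t, t < M → full[i + t]? = some ' ') : pvOk M full i = true := by
  unfold pvOk
  simp only [Bool.and_eq_true, decide_eq_true_eq, List.all_eq_true]
  refine ⟨hle, fun c hc => ?_⟩
  obtain ⟨t, ht, hx⟩ := List.mem_iff_getElem.mp hc
  have hlen : t < M := by
    have := ht; simp [List.length_take, List.length_drop] at this; omega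
  have h1 : i + t < full.length := by omega
  have hsome : full[i + t]? = some ' ' := hsp t hlen
  rw [List.getElem?_eq_getElem h1] at hsome
  simp only [List.getElem_take, List.getElem_drop] at hx
  rw [← hx]
  simp only [Option.some.injEq] at hsome
  simp [hsome]

lemma pvOk_false (M : Nat) (full : List Char) (t p : Nat) (h1 : t ≤ p) (h2 : p < t + M)
    (h3 : p < full.length) (h4 : full[p] ≠ ' ') : pvOk M full t = false := by
  unfold pvOk
  by_cases hle : t + M ≤ full.length
  · simp only [hle, decide_true, Bool.true_and]
    rw [List.all_eq_false]
    refine ⟨full[p], ?_, by simpa using h4⟩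
    apply List.mem_iff_getElem.mpr
    refine ⟨p - t, ?_, ?_⟩
    · simp [List.length_take, List.length_drop]; omega
    · simp only [List.getElem_take, List.getElem_drop]
      congr 1; omega
  · simp [hle]

lemma pvR_step (M : Nat) (full : List Char) (i : Nat) (h : pvOk M full i = false) :
    pvR M full i = pvR M full (i + 1) := by
  rw [pvR]
  split
  · rw [h]; simp
  · rw [pvR, dif_neg (by omega)]

lemma pvR_skip (M : Nat) (full : List Char) (i k : Nat)
    (h : ∀ t, i ≤ t → t < i + k → pvOk M full t = false) :
    pvR M full i = pvR M full (i + k) := by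
  induction k generalizing i with
  | zero => rfl
  | succ k ih =>
    rw [pvR_step M full i (h i le_rfl (by omega))]
    rw [ih (i + 1) (fun t ht1 ht2 => h t (by omega) (by omega))]
    congr 1; omega

lemma outerA_stop (cs : List Char) (l m i idx : Int) (h : idx ≠ -1) :
    pvOuterA cs l m i idx = idx := by
  rw [pvOuterA]; exact dif_neg (fun hc => h hc.2)

theorem innerA_spec (full : List Char) (M i j : Nat) (hj : j ≤ M)
    (hsp : ∀ t, t < j → full[i + t]? = some ' ') :
    ∃ r : Nat, pvInnerA full (i : Int) (M : Int) (j : Int) = (r : Int) ∧ j ≤ r ∧ r ≤ M ∧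
      (∀ t, t < r → full[i + t]? = some ' ') ∧
      (r < M → full[i + r]? ≠ some ' ') := by
  have hget : PySem.List.pyGet? full ((i : Int) + (j : Int)) = full[i + j]? := by
    rw [show (i : Int) + (j : Int) = ((i + j : Nat) : Int) by push_cast; ring]
    exact PySem.List.pyGet?_natCast full (i + j)
  rw [pvInnerA]
  by_cases hjm : j < M
  · by_cases hs : full[i + j]? = some ' '
    · rw [dif_pos ⟨by exact_mod_cast hjm, by rw [hget]; exact hs⟩]
      obtain ⟨r, hr, h1, h2, h3, h4⟩ := innerA_spec full M i (j + 1) (by omega)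
        (fun t ht => by rcases Nat.lt_or_ge t j with h | h
                        · exact hsp t h
                        · have : t = j := by omega
                          subst this; exact hs)
      exact ⟨r, by rw [show ((j : Int) + 1) = ((j + 1 : Nat) : Int) by push_cast; ring]; exact hr,
        by omega, h2, h3, h4⟩
    · rw [dif_neg (fun hc => hs (by rw [← hget]; exact hc.2))]
      exact ⟨j, rfl, le_rfl, hj, hsp, fun _ => hs⟩
  · rw [dif_neg (fun hc => hjm (by exact_mod_cast hc.1))]
    have : j = M := by omega
    subst this
    exact ⟨j, rfl, le_rfl, le_rfl, hsp, fun h => absurd h (by omega)⟩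
termination_by M - j

theorem outerA_eq_R (full : List Char) (M : Nat) (hM : 0 < M) (i : Nat) :
    pvOuterA full (full.length : Int) (M : Int) (i : Int) (-1) = pvR M full i := by
  by_cases hle : i + M ≤ full.length
  · obtain ⟨r, hr, _, hrM, hsp, hns⟩ := innerA_spec full M i 0 (by omega)
      (fun t ht => absurd ht (by omega))
    simp only [Nat.cast_zero] at hr
    rw [pvOuterA, dif_pos ⟨by omega, rfl⟩, hr]
    by_cases heq : r = M
    · rw [if_pos (by exact_mod_cast heq), outerA_stop _ _ _ _ _ (by omega)]
      rw [pvR, dif_pos hle, if_pos (pvOk_of M full i hle (fun t ht => hsp t (by omega)))]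
    · have hrM' : r < M := by omega
      have hp : i + r < full.length := by omega
      have hns' : full[i + r] ≠ ' ' := by
        intro hcontra
        exact (hns hrM') (by rw [List.getElem?_eq_getElem hp, hcontra])
      rw [if_neg (by exact_mod_cast heq)]
      rw [show ((i : Int) + max 1 (r : Int)) = ((i + max 1 r : Nat) : Int) by push_cast; ring]
      rw [outerA_eq_R full M hM (i + max 1 r)]
      rw [pvR_skip M full i (max 1 r) (fun t ht1 ht2 =>
        pvOk_false M full t (i + r) (by omega) (by omega) hp hns')]
  · rw [pvOuterA, dif_neg (fun hc => hle (by have := hc.1; push_cast at this; omega))]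
    rw [pvR, dif_neg (by omega)]
termination_by full.length + 1 - i
decreasing_by
  have := le_max_left 1 r
  omega

theorem loopB_eq_R (M : Nat) (hM : 0 < M) (full : List Char) (i count : Nat)
    (hi : i ≤ full.length) (hc : count ≤ i) (hcm : count < M)
    (hsp : ∀ t, i - count ≤ t → t < i → full[t]? = some ' ') :
    pvLoopB (M : Int) (full.drop i) (i : Int) (count : Int) = pvR M full (i - count) := by
  by_cases hlen : i < full.length
  · rw [List.drop_eq_getElem_cons hlen]
    by_cases hsC : full[i] = ' '
    · by_cases hdone : count + 1 = M
      · show (if full[i] = ' ' then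
          if (count : Int) + 1 = (M : Int) then (i : Int) - (M : Int) + 1
          else pvLoopB (M : Int) (full.drop (i+1)) ((i : Int) + 1) ((count : Int) + 1)
          else pvLoopB (M : Int) (full.drop (i+1)) ((i : Int) + 1) 0) = _
        rw [if_pos hsC, if_pos (by exact_mod_cast hdone)]
        have hok : pvOk M full (i - count) = true := by
          apply pvOk_of M full (i - count) (by omega)
          intro t ht
          by_cases htop : (i - count) + t = i
          · rw [htop, List.getElem?_eq_getElem hlen, hsC]
          · exact hsp ((i - count) + t) (by omega) (by omega)
        rw [pvR, dif_pos (by omega), if_pos hok]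
        omega
      · show (if full[i] = ' ' then
          if (count : Int) + 1 = (M : Int) then (i : Int) - (M : Int) + 1
          else pvLoopB (M : Int) (full.drop (i+1)) ((i : Int) + 1) ((count : Int) + 1)
          else pvLoopB (M : Int) (full.drop (i+1)) ((i : Int) + 1) 0) = _
        rw [if_pos hsC, if_neg (fun hcon => hdone (by exact_mod_cast hcon))]
        rw [show ((i : Int) + 1) = ((i + 1 : Nat) : Int) by push_cast; ring,
            show ((count : Int) + 1) = ((count + 1 : Nat) : Int) by push_cast; ring]
        rw [loopB_eq_R M hM full (i + 1) (count + 1) (by omega) (by omega) (by omega)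
          (fun t ht1 ht2 => by
            by_cases htop : t = i
            · subst htop; rw [List.getElem?_eq_getElem hlen, hsC]
            · exact hsp t (by omega) (by omega))]
        congr 1; omega
    · show (if full[i] = ' ' then
        if (count : Int) + 1 = (M : Int) then (i : Int) - (M : Int) + 1
        else pvLoopB (M : Int) (full.drop (i+1)) ((i : Int) + 1) ((count : Int) + 1)
        else pvLoopB (M : Int) (full.drop (i+1)) ((i : Int) + 1) 0) = _
      rw [if_neg hsC]
      rw [show ((i : Int) + 1) = ((i + 1 : Nat) : Int) by push_cast; ring,
          show ((0 : Int)) = ((0 : Nat) : Int) by norm_num]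
      rw [loopB_eq_R M hM full (i + 1) 0 (by omega) (by omega) hM (fun t ht1 ht2 => by omega)]
      rw [pvR_skip M full (i - count) (count + 1) (fun t ht1 ht2 =>
        pvOk_false M full t i (by omega) (by omega) hlen hsC)]
      congr 1; omega
  · rw [List.drop_eq_nil_iff.mpr (by omega)]
    show (-1 : Int) = _
    rw [pvR, dif_neg (by omega)]
termination_by full.length - i

lemma outerA_neg (cs : List Char) (l m : Int) (hm : m < 0) (i : Int) :
    pvOuterA cs l m i (-1) = -1 := by
  rw [pvOuterA]
  split
  case isTrue h =>
    have hj : pvInnerA cs i m 0 = 0 := by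
      rw [pvInnerA, dif_neg (fun hc => by omega)]
    rw [hj, if_neg (by omega)]
    have : i + max 1 (0 : Int) = i + 1 := by simp
    rw [this]
    exact outerA_neg cs l m hm (i + 1)
  case isFalse h => rfl
termination_by (l - m + 1 - i).toNat
decreasing_by omega

lemma loopB_neg (m : Int) (hm : m < 0) (cs : List Char) :
    ∀ (i count : Int), 0 ≤ count → pvLoopB m cs i count = -1 := by
  induction cs with
  | nil => intro i count _; rfl
  | cons c cs ih =>
    intro i count hc
    show (if c = ' ' then
      if count + 1 = m then i - m + 1 else pvLoopB m cs (i + 1) (count + 1)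
      else pvLoopB m cs (i + 1) 0) = -1
    split_ifs with h1 h2
    · omega
    · exact ih (i + 1) (count + 1) (by omega)
    · exact ih (i + 1) 0 (by omega)

-- ===== VERDICT (by name: the statement is the Claim_ definition above) =====
theorem blank_space_counter_spec : Claim_equal_blank_space_counter := by
  unfold Claim_equal_blank_space_counter
  intro s m _
  unfold Spec_blank_space_counter blank_space_counter blank_space_counter_alt
  rcases lt_trichotomy m 0 with hm | hm | hm
  · rw [if_neg (by omega), loopB_neg m hm _ 0 0 le_rfl, outerA_neg _ _ _ hm 0]
  · subst hm
    rw [if_pos rfl]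
    rw [pvOuterA, dif_pos ⟨by omega, rfl⟩]
    have hj : pvInnerA s.toList 0 0 0 = 0 := by
      rw [pvInnerA, dif_neg (fun hc => by omega)]
    rw [hj, if_pos rfl]
    exact outerA_stop _ _ _ _ _ (by omega)
  · have hM : 0 < m.toNat := by omega
    have hcast : m = ((m.toNat : Nat) : Int) := (Int.toNat_of_nonneg (by omega)).symm
    rw [if_neg (by omega), hcast]
    have hA := outerA_eq_R s.toList m.toNat hM 0
    have hB := loopB_eq_R m.toNat hM s.toList 0 0 (by omega) le_rfl hM (fun t ht1 ht2 => by omega)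
    simp only [Nat.cast_zero, List.drop_zero, Nat.sub_zero] at hA hB
    rw [hA, hB]
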